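-- pv_equiv track=rewrite | github.com/jeraldlyh/CodeITSuisse-2022 | routes/Rubiks.py | parse_ops
-- ===== SOURCE A (Python) =====
-- def parse_ops(ops): # parse string of operations passed in
--     opsArr = []
--     n = len(ops)
--     start = 0
--     next = 0
--     while start < n:
--         next = start+1
--         if next < n and ops[next] == 'i':
--             opsArr.append(ops[start:next+1])
--             start+=2
--         else:
--             opsArr.append(ops[start])
--             start+=1
--
--     return opsArr
-- ===== SOURCE B (Python) =====
-- def parse_ops(ops):  # single pass: merge an 'i' onto a pending one-char token
--     out = []
--     for c in ops:
--         if c == 'i' and out and len(out[-1]) == 1: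
--             out[-1] += c
--         else:
--             out.append(c)
--     return out
-- ===== Notes on version B (the rewrite author's own statement) =====
-- stated objective: simpler
-- what changed: Replaced A's index/while loop with bounds checks and slicing by a single for-each pass that appends each character as a new token and merges an 'i' onto the previous token when that token is still a single character.
import Mathlib
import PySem

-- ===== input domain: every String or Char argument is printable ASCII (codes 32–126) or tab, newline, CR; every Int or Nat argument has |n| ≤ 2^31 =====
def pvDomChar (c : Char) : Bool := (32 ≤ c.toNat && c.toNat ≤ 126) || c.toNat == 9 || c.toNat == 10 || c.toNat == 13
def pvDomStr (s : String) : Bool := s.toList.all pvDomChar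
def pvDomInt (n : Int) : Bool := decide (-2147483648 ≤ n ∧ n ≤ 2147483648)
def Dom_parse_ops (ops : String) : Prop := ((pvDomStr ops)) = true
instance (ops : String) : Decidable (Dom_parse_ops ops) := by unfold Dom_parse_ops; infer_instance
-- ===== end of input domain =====

-- B replaces A's index/while loop and slicing by a single for-each pass that merges
-- an 'i' onto a pending one-char token (objective: simpler).

-- ===== PORT A =====
-- A's while loop: start index, bounds checks, slice/index appends; tokens kept as
-- char lists and made Strings at the end (Python's string tokens are char sequences).
def parse_ops_loop (ops : List Char) (n : Nat) (start : Nat) (acc : List (List Char)) :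
    List (List Char) :=
  if _h : start < n then
    if start + 1 < n ∧ PySem.List.pyGet? ops ((start : Int) + 1) = some 'i' then
      parse_ops_loop ops n (start + 2)
        (acc ++ [PySem.List.slice ops (some (start : Int)) (some ((start : Int) + 2))])
    else
      parse_ops_loop ops n (start + 1)
        (acc ++ [(PySem.List.pyGet? ops (start : Int)).toList])
  else acc
termination_by n - start
decreasing_by all_goals omega

def parse_ops (ops : String) : List String :=
  (parse_ops_loop ops.toList ops.toList.length 0 []).map String.mk

-- ===== PORT B =====
-- B's loop body: append c as a new token, or merge 'i' onto a one-char last token.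
def parse_ops_step (out : List (List Char)) (c : Char) : List (List Char) :=
  match out.getLast? with
  | some t => if c = 'i' ∧ t.length = 1 then out.dropLast ++ [t ++ [c]] else out ++ [[c]]
  | none => out ++ [[c]]

def parse_ops_alt (ops : String) : List String :=
  (ops.toList.foldl parse_ops_step []).map String.mk

-- ===== PRECONDITION & SPEC =====
def Spec_parse_ops (ops : String) (out : List String) : Prop := out = parse_ops_alt ops
instance (ops : String) (out : List String) : Decidable (Spec_parse_ops ops out) := by unfold Spec_parse_ops; infer_instance

-- ===== CLAIM (what is proved, stated in full; the proofs are below) =====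
def Claim_equal_parse_ops : Prop := ∀ (ops : String), Dom_parse_ops ops → Spec_parse_ops ops (parse_ops ops)

-- ===== LEMMAS AND PROOFS =====

-- Common characterisation: the token list both programs build.
def pvTok : List Char → List (List Char)
  | [] => []
  | [c] => [[c]]
  | c :: c2 :: rest =>
      if c2 = 'i' then [c, c2] :: pvTok rest else [c] :: pvTok (c2 :: rest)


lemma parse_ops_loop_eq (l : List Char) (start : Nat) (acc : List (List Char)) :
    parse_ops_loop l l.length start acc = acc ++ pvTok (l.drop start) := by
  fun_induction parse_ops_loop l l.length start acc with
  | case1 start acc h hc ih =>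
      obtain ⟨h1, h2⟩ := hc
      have e1 : ((start : Int) + 1) = ((start + 1 : Nat) : Int) := by push_cast; ring
      rw [e1, PySem.List.pyGet?_natCast] at h2
      have hi : l[start + 1]'h1 = 'i' := by
        have := (List.getElem?_eq_some_iff.mp h2); exact this.choose_spec
      have hd1 : l.drop start = l[start] :: l.drop (start + 1) :=
        List.drop_eq_getElem_cons h
      have hd2 : l.drop (start + 1) = l[start + 1] :: l.drop (start + 2) :=
        List.drop_eq_getElem_cons h1
      have e2 : ((start : Int) + 2) = ((start + 2 : Nat) : Int) := by push_cast; ring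
      have hs : PySem.List.slice l (some (start : Int)) (some ((start : Int) + 2))
          = [l[start], l[start + 1]] := by
        rw [e2, PySem.List.slice_natCast]
        have : start + 2 - start = 2 := by omega
        rw [this, hd1, hd2]
        rfl
      rw [ih, hs, hd1, hd2, hi]
      simp [pvTok]
  | case2 start acc h hc ih =>
      have hd1 : l.drop start = l[start] :: l.drop (start + 1) :=
        List.drop_eq_getElem_cons h
      have hg : PySem.List.pyGet? l (start : Int) = some l[start] := by
        rw [PySem.List.pyGet?_natCast]; exact List.getElem?_eq_some_iff.mpr ⟨h, rfl⟩
      rw [ih, hg, hd1]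
      by_cases h1 : start + 1 < l.length
      · have hd2 : l.drop (start + 1) = l[start + 1] :: l.drop (start + 2) :=
          List.drop_eq_getElem_cons h1
        have hni : l[start + 1] ≠ 'i' := by
          intro he
          apply hc
          constructor
          · exact h1
          · have e1 : ((start : Int) + 1) = ((start + 1 : Nat) : Int) := by push_cast; ring
            rw [e1, PySem.List.pyGet?_natCast]
            exact List.getElem?_eq_some_iff.mpr ⟨h1, he⟩
        rw [hd2]
        simp [pvTok, hni]
      · have hd2 : l.drop (start + 1) = [] := List.drop_eq_nil_of_le (by omega)
        rw [hd2]
        simp [pvTok]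
  | case3 start acc h =>
      have : l.drop start = [] := List.drop_eq_nil_of_le (by omega)
      simp [this, pvTok]

lemma foldl_step_eq (l : List Char) :
    ∀ acc : List (List Char),
      (∀ t, acc.getLast? = some t → t.length = 1 → l.head? ≠ some 'i') →
      l.foldl parse_ops_step acc = acc ++ pvTok l := by
  induction l using pvTok.induct with
  | case1 => intro acc _; simp [pvTok]
  | case2 c =>
      intro acc hp
      have hstep1 : parse_ops_step acc c = acc ++ [[c]] := by
        cases hl : acc.getLast? with
        | none => simp [parse_ops_step, hl]
        | some t =>
            by_cases hcond : c = 'i' ∧ t.length = 1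
            · have := hp t hl hcond.2
              simp [hcond.1] at this
            · simp [parse_ops_step, hl, hcond]
      simp only [List.foldl_cons, List.foldl_nil, hstep1]
      simp [pvTok]
  | case3 c rest ih =>
      intro acc hp
      have hstep1 : parse_ops_step acc c = acc ++ [[c]] := by
        cases hl : acc.getLast? with
        | none => simp [parse_ops_step, hl]
        | some t =>
            by_cases hcond : c = 'i' ∧ t.length = 1
            · have := hp t hl hcond.2
              simp [hcond.1] at this
            · simp [parse_ops_step, hl, hcond]
      have hstep2 : parse_ops_step (acc ++ [[c]]) 'i' = acc ++ [[c, 'i']] := by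
        simp [parse_ops_step]
      rw [List.foldl_cons, hstep1, List.foldl_cons, hstep2, ih _ (by simp)]
      simp [pvTok]
  | case4 c c2 rest hni ih =>
      intro acc hp
      have hstep1 : parse_ops_step acc c = acc ++ [[c]] := by
        cases hl : acc.getLast? with
        | none => simp [parse_ops_step, hl]
        | some t =>
            by_cases hcond : c = 'i' ∧ t.length = 1
            · have := hp t hl hcond.2
              simp [hcond.1] at this
            · simp [parse_ops_step, hl, hcond]
      rw [List.foldl_cons, hstep1, ih _ (by simp [hni])]
      simp [pvTok, hni]

-- ===== VERDICT (by name: the statement is the Claim_ definition above) =====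
theorem parse_ops_spec : Claim_equal_parse_ops := by
  intro ops _
  unfold Spec_parse_ops parse_ops parse_ops_alt
  rw [parse_ops_loop_eq, foldl_step_eq _ [] (by simp)]
  simp
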